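-- pv_equiv track=rewrite | github.com/clan-lol/clan-core | pkgs/clan-cli/clan_cli/errors.py | indent_command
-- ===== SOURCE A (Python) =====
-- import shlex
--
-- def indent_command(command_list: list[str]) -> str:
--     formatted_command = []
--     i = 0
--     while i < len(command_list):
--         arg = command_list[i]
--         formatted_command.append(shlex.quote(arg))
--
--         if i < len(command_list) - 1:
--             # Check if the current argument is an option
--             if arg.startswith("-"):
--                 # Indent after the next argument
--                 formatted_command.append(" ")
--                 i += 1
--                 formatted_command.append(shlex.quote(command_list[i]))
--
--         if i < len(command_list) - 1:
--             # Add line continuation only if it's not the last argument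
--             formatted_command.append(" \\\n    ")
--
--         i += 1
--
--     # Join the list into a single string
--     final_command = "".join(formatted_command)
--
--     # Remove the trailing continuation if it exists
--     if final_command.endswith(" \\ \n    "):
--         final_command = final_command.rsplit(" \\ \n    ", 1)[0]
--     return final_command
-- ===== SOURCE B (Python) =====
-- import string
--
-- _SAFE = frozenset(string.ascii_letters + string.digits + "_@%+=:,./-")
--
--
-- def _quote(arg: str) -> str:
--     """Quote a string so it can be pasted into a POSIX shell."""
--     if not arg:
--         return "''"
--     if all(c in _SAFE for c in arg):
--         return arg
--     return "'" + arg.replace("'", "'\"'\"'") + "'"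
--
--
-- def indent_command(command_list: list[str]) -> str:
--     # State machine over the arguments: each quoted argument either starts a
--     # new output line or, when the previous argument was a "-" option still
--     # awaiting its value, is glued onto the current line.
--     lines = []
--     pending = False
--     for arg in command_list:
--         q = _quote(arg)
--         if pending:
--             lines[-1] = lines[-1] + " " + q
--             pending = False
--         else:
--             lines.append(q)
--             pending = arg.startswith("-")
--     return " \\\n    ".join(lines)
-- ===== Notes on version B (the rewrite author's own statement) =====
-- stated objective: simpler
-- what changed: B is a single fold / state machine with a 'pending option' flag that glues each quoted argument onto the current line or starts a new one, then joins the lines; A is an index-driven while loop with lookahead (consuming two tokens at once) that emits a flat token-plus-separator list and carries a dead trailing-strip block.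
import Mathlib
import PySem

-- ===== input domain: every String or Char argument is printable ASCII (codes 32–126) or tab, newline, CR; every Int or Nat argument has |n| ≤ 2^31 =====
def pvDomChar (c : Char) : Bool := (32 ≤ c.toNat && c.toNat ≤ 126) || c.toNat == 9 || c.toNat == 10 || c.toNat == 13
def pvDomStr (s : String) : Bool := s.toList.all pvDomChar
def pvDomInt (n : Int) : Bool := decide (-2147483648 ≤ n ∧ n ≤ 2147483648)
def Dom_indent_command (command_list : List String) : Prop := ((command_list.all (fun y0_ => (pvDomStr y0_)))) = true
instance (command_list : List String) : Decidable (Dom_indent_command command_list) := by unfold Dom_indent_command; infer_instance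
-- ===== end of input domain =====

-- B replaces A's index/lookahead while loop (and its dead trailing-strip block) by a single
-- fold with a 'pending option' flag that builds the output lines and joins them (objective: simpler).

-- shared helper: POSIX-shell quoting (A calls shlex.quote, B's _quote computes the same;
-- exact on the ASCII domain): safe chars are ASCII letters/digits plus _@%+=:,./- ;
-- empty string -> "''" ; otherwise wrap in single quotes, replacing ' by '"'"'.
def pvShlexSafe (c : Char) : Bool :=
  c.isAlpha || c.isDigit || c == '_' || c == '@' || c == '%' || c == '+' || c == '=' ||
  c == ':' || c == ',' || c == '.' || c == '/' || c == '-'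

def pvQuote (s : String) : String :=
  if s.toList.isEmpty then "''"
  else if s.toList.all pvShlexSafe then s
  else String.ofList ('\'' :: (s.toList.flatMap fun c => if c == '\'' then "'\"'\"'".toList else [c]) ++ ['\''])

-- ===== PORT A =====
-- the while loop, transcribed as recursion on the remaining suffix of command_list
-- (i advances by 1, or by 2 when a "-" option pairs with the next argument;
-- 'rest.isEmpty' is the 'i < len(command_list) - 1' test after the pairing)
def pvLoopA : List String → List String
  | [] => []
  | [a] => [pvQuote a]
  | a :: b :: rest =>
    if PySem.Str.startswith a "-" then
      if rest.isEmpty then [pvQuote a, " ", pvQuote b]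
      else [pvQuote a, " ", pvQuote b, " \\\n    "] ++ pvLoopA rest
    else
      [pvQuote a, " \\\n    "] ++ pvLoopA (b :: rest)

def indent_command (command_list : List String) : String :=
  let final := PySem.Str.join "" (pvLoopA command_list)
  if PySem.Str.endswith final " \\ \n    " then
    -- final.rsplit(" \\ \n    ", 1)[0]: under the endswith guard the LAST occurrence of the
    -- separator is the trailing one, so this is exactly dropping the 8-char sentinel
    String.ofList (final.toList.take (final.toList.length - 8))
  else final

-- ===== PORT B =====
-- the for loop's body: state = (lines, pending).  'lines[-1] = lines[-1] + " " + q' is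
-- dropLast ++ [getLastD ...] (pending is only ever true with lines nonempty, so the
-- total-making default "" is unreachable).
def pvStepB (st : List String × Bool) (arg : String) : List String × Bool :=
  let q := pvQuote arg
  if st.2 then (st.1.dropLast ++ [st.1.getLastD "" ++ " " ++ q], false)
  else (st.1 ++ [q], PySem.Str.startswith arg "-")

def indent_command_alt (command_list : List String) : String :=
  PySem.Str.join " \\\n    " (command_list.foldl pvStepB ([], false)).1

-- ===== PRECONDITION & SPEC =====
def Spec_indent_command (command_list : List String) (out : String) : Prop := out = indent_command_alt command_list
instance (command_list : List String) (out : String) : Decidable (Spec_indent_command command_list out) := by unfold Spec_indent_command; infer_instance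

-- ===== CLAIM (what is proved, stated in full; the proofs are below) =====
def Claim_equal_indent_command : Prop := ∀ (command_list : List String), Dom_indent_command command_list → Spec_indent_command command_list (indent_command command_list)

-- ===== LEMMAS AND PROOFS =====

-- proof-side characterisation of B's fold: the list of output line-groups
def pvGroupsB : List String → List String
  | [] => []
  | [a] => [pvQuote a]
  | a :: b :: rest =>
    if PySem.Str.startswith a "-" then
      (pvQuote a ++ " " ++ pvQuote b) :: pvGroupsB rest
    else
      pvQuote a :: pvGroupsB (b :: rest)

-- B's fold computes pvGroupsB
theorem pvFoldB_eq (l : List String) :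
    ∀ lines : List String, (l.foldl pvStepB (lines, false)).1 = lines ++ pvGroupsB l := by
  induction l using pvGroupsB.induct with
  | case1 => intro lines; simp [pvGroupsB]
  | case2 a =>
    intro lines
    simp [pvStepB, pvGroupsB]
  | case3 a b rest hsw ih =>
    intro lines
    simp only [List.foldl_cons]
    rw [show pvStepB (lines, false) a = (lines ++ [pvQuote a], PySem.Str.startswith a "-") from rfl,
        hsw]
    rw [show pvStepB (lines ++ [pvQuote a], true) b
          = ((lines ++ [pvQuote a]).dropLast ++
              [(lines ++ [pvQuote a]).getLastD "" ++ " " ++ pvQuote b], false) from rfl]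
    rw [List.dropLast_concat, List.getLastD_concat, ih, pvGroupsB, if_pos hsw]
    simp
  | case4 a b rest hsw ih =>
    intro lines
    have hsw' : PySem.Str.startswith a "-" = false := by simpa using hsw
    simp only [List.foldl_cons]
    rw [show pvStepB (lines, false) a = (lines ++ [pvQuote a], PySem.Str.startswith a "-") from rfl,
        hsw']
    have h := ih (lines ++ [pvQuote a])
    simp only [List.foldl_cons] at h
    rw [h, pvGroupsB, if_neg hsw]
    simp

theorem getLast?_append_right {α : Type} (l l' : List α) (h : l' ≠ []) :
    (l ++ l').getLast? = l'.getLast? := by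
  rw [List.getLast?_append]
  cases hl : l'.getLast? with
  | none => exact absurd (List.getLast?_eq_none_iff.mp hl) h
  | some _ => rfl

theorem pvQuote_ne_nil (s : String) : (pvQuote s).toList ≠ [] := by
  unfold pvQuote
  split_ifs with h1 h2
  · decide
  · simpa [List.isEmpty_iff] using h1
  · simp

theorem pvQuote_last_ne_space (s : String) :
    (pvQuote s).toList.getLast? ≠ some ' ' := by
  unfold pvQuote
  split_ifs with h1 h2
  · decide
  · intro h
    have hne : s.toList ≠ [] := by simpa [List.isEmpty_iff] using h1
    rw [List.getLast?_eq_some_getLast hne] at h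
    have hc : s.toList.getLast hne = ' ' := by injection h
    have hsafe := List.all_eq_true.mp h2 _ (List.getLast_mem hne)
    rw [hc] at hsafe
    exact absurd hsafe (by decide)
  · rw [String.toList_ofList, List.getLast?_concat]
    decide

theorem pvGroupsB_mem (l : List String) (g : String) (hg : g ∈ pvGroupsB l) :
    g.toList ≠ [] := by
  induction l using pvGroupsB.induct with
  | case1 => simp [pvGroupsB] at hg
  | case2 a =>
    simp [pvGroupsB] at hg
    subst hg; exact pvQuote_ne_nil a
  | case3 a b rest hsw ih =>
    rw [pvGroupsB, if_pos hsw] at hg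
    rcases List.mem_cons.mp hg with h | h
    · subst h
      simp only [String.toList_append]
      intro hnil
      exact pvQuote_ne_nil b (by simpa using (List.append_eq_nil_iff.mp hnil).2)
    · exact ih h
  | case4 a b rest hsw ih =>
    rw [pvGroupsB, if_neg hsw] at hg
    rcases List.mem_cons.mp hg with h | h
    · subst h; exact pvQuote_ne_nil a
    · exact ih h

theorem pvGroupsB_ne_nil (l : List String) (h : l ≠ []) : pvGroupsB l ≠ [] := by
  match l with
  | [a] => simp [pvGroupsB]
  | a :: b :: rest =>
    unfold pvGroupsB
    split_ifs <;> simp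

theorem pvJoin_ne_nil (sep g : List Char) (gs : List (List Char)) (h : g ≠ []) :
    PySem.Chars.join sep (g :: gs) ≠ [] := by
  cases gs with
  | nil => rw [PySem.Chars.join_singleton]; exact h
  | cons y ys =>
    rw [PySem.Chars.join_cons_cons]
    simp [h]

-- joining with the empty separator prepends each token
theorem pvJoin0_cons (x : List Char) (xs : List (List Char)) :
    PySem.Chars.join [] (x :: xs) = x ++ PySem.Chars.join [] xs := by
  cases xs with
  | nil => simp [PySem.Chars.join_singleton, PySem.Chars.join_nil]
  | cons y ys => rw [PySem.Chars.join_cons_cons]; simp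

-- A's flat token list joined by "" equals B's groups joined by the separator
theorem pvJoin_eq (l : List String) :
    PySem.Chars.join [] ((pvLoopA l).map String.toList) =
      PySem.Chars.join " \\\n    ".toList ((pvGroupsB l).map String.toList) := by
  induction l using pvLoopA.induct with
  | case1 => rfl
  | case2 a => simp [pvLoopA, pvGroupsB, PySem.Chars.join_singleton]
  | case3 a b rest hsw hemp =>
    have : rest = [] := List.isEmpty_iff.mp hemp
    subst this
    rw [pvLoopA, if_pos hsw, if_pos (show ([] : List String).isEmpty = true from rfl), pvGroupsB, if_pos hsw]
    simp [pvJoin0_cons, pvGroupsB, PySem.Chars.join_singleton,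
      String.toList_append]
  | case4 a b rest hsw hemp ih =>
    obtain ⟨g, gs, hgs⟩ :=
      List.exists_cons_of_ne_nil (pvGroupsB_ne_nil rest ((by simpa using hemp)))
    rw [pvLoopA, if_pos hsw, if_neg (by simp [hemp]), pvGroupsB, if_pos hsw]
    rw [hgs] at ih ⊢
    simp only [List.map_cons, List.cons_append, List.nil_append,
      pvJoin0_cons, PySem.Chars.join_cons_cons, String.toList_append] at ih ⊢
    simp [ih, List.append_assoc]
  | case5 a b rest hsw ih =>
    obtain ⟨g, gs, hgs⟩ := List.exists_cons_of_ne_nil (pvGroupsB_ne_nil (b :: rest) (by simp))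
    rw [pvLoopA, if_neg hsw, pvGroupsB, if_neg hsw]
    rw [hgs] at ih ⊢
    simp only [List.map_cons, List.cons_append, List.nil_append,
      pvJoin0_cons, PySem.Chars.join_cons_cons] at ih ⊢
    simp [ih, List.append_assoc]

-- the last character of B's joined result is never a space
theorem pvJoinB_last (l : List String) :
    (PySem.Chars.join " \\\n    ".toList ((pvGroupsB l).map String.toList)).getLast? ≠ some ' ' := by
  induction l using pvGroupsB.induct with
  | case1 => simp [pvGroupsB, PySem.Chars.join_nil]
  | case2 a =>
    simpa [pvGroupsB, PySem.Chars.join_singleton] using pvQuote_last_ne_space a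
  | case3 a b rest hsw ih =>
    rw [pvGroupsB, if_pos hsw]
    cases hrest : pvGroupsB rest with
    | nil =>
      simp only [List.map_cons, List.map_nil, PySem.Chars.join_singleton,
        String.toList_append]
      rw [getLast?_append_right _ _ (pvQuote_ne_nil b)]
      exact pvQuote_last_ne_space b
    | cons g gs =>
      rw [hrest] at ih
      have hgne : g.toList ≠ [] := pvGroupsB_mem rest g (by rw [hrest]; exact List.mem_cons_self)
      simp only [List.map_cons, PySem.Chars.join_cons_cons] at ih ⊢
      rw [getLast?_append_right _ _ (pvJoin_ne_nil _ _ _ hgne)]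
      exact ih
  | case4 a b rest hsw ih =>
    rw [pvGroupsB, if_neg hsw]
    obtain ⟨g, gs, hgs⟩ := List.exists_cons_of_ne_nil (pvGroupsB_ne_nil (b :: rest) (by simp))
    rw [hgs] at ih ⊢
    have hgne : g.toList ≠ [] := pvGroupsB_mem (b :: rest) g (by rw [hgs]; exact List.mem_cons_self)
    simp only [List.map_cons, PySem.Chars.join_cons_cons] at ih ⊢
    rw [getLast?_append_right _ _ (pvJoin_ne_nil _ _ _ hgne)]
    exact ih

-- ===== VERDICT (by name: the statement is the Claim_ definition above) =====
theorem indent_command_spec : Claim_equal_indent_command := by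
  intro cl _
  unfold Spec_indent_command indent_command indent_command_alt
  rw [show (cl.foldl pvStepB ([], false)).1 = pvGroupsB cl by
        simpa using pvFoldB_eq cl []]
  have hto : (PySem.Str.join "" (pvLoopA cl)).toList
      = (PySem.Str.join " \\\n    " (pvGroupsB cl)).toList := by
    rw [PySem.Str.toList_join, PySem.Str.toList_join]
    exact pvJoin_eq cl
  have hend : PySem.Str.endswith (PySem.Str.join "" (pvLoopA cl)) " \\ \n    " = false := by
    rw [PySem.Str.endswith_eq]
    apply Bool.eq_false_iff.mpr
    intro htrue
    obtain ⟨t, ht⟩ := (PySem.Chars.endswith_iff _ _).mp htrue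
    have hlast : (PySem.Str.join "" (pvLoopA cl)).toList.getLast? = some ' ' := by
      rw [← ht, getLast?_append_right _ _ (by decide)]
      decide
    rw [hto, PySem.Str.toList_join] at hlast
    exact pvJoinB_last cl hlast
  simp only [hend, Bool.false_eq_true, if_false]
  calc PySem.Str.join "" (pvLoopA cl)
      = String.ofList (PySem.Str.join "" (pvLoopA cl)).toList := String.ofList_toList.symm
    _ = String.ofList (PySem.Str.join " \\\n    " (pvGroupsB cl)).toList := by rw [hto]
    _ = PySem.Str.join " \\\n    " (pvGroupsB cl) := String.ofList_toList
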